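-- pv_equiv track=rewrite | github.com/gyocheol/baekjoon | 백준/Silver/17829. 222－풀링/222－풀링.py | pooling_layer
-- ===== SOURCE A (Python) =====
-- def pooling_layer(arr, size):
--     ans = [[0] * (size // 2) for i in range(size // 2)]
--
--     for i in range(size // 2):
--         for j in range(size // 2):
--             candidates = [arr[2 * i][2 * j], arr[2 * i + 1][2 * j],
--                           arr[2 * i][2 * j + 1], arr[2 * i + 1][2 * j + 1]]
--             candidates.sort(reverse=True)
--             ans[i][j] = candidates[1]
--
--     return ans
-- ===== SOURCE B (Python) =====
-- def pooling_layer(arr, size):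
--     half = size // 2
--     if half <= 0:
--         return []
--     # pass 1 (vertical): merge each pair of rows into one row of sorted (hi, lo) pairs
--     pairs = []
--     for i in range(half):
--         r1, r2 = arr[2 * i], arr[2 * i + 1]
--         pairs.append([(x, y) if x >= y else (y, x) for x, y in zip(r1, r2)])
--     # pass 2 (horizontal): second-largest of two sorted pairs in closed form:
--     # max of the smaller hi and the lo on the larger-hi side
--     return [[max(min(row[2 * j][0], row[2 * j + 1][0]),
--                  row[2 * j][1] if row[2 * j][0] >= row[2 * j + 1][0] else row[2 * j + 1][1])
--              for j in range(half)]
--             for row in pairs]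
-- ===== Notes on version B (the rewrite author's own statement) =====
-- stated objective: alternative
-- what changed: B replaces the per-block gather-sort-index with two staged passes: a vertical pass merging each pair of rows into an intermediate row of sorted (hi,lo) pairs via zip, then a horizontal pass combining adjacent sorted pairs by the closed-form second-order-statistic max(min(hi1,hi2), lo of the larger-hi side).
import Mathlib
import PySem

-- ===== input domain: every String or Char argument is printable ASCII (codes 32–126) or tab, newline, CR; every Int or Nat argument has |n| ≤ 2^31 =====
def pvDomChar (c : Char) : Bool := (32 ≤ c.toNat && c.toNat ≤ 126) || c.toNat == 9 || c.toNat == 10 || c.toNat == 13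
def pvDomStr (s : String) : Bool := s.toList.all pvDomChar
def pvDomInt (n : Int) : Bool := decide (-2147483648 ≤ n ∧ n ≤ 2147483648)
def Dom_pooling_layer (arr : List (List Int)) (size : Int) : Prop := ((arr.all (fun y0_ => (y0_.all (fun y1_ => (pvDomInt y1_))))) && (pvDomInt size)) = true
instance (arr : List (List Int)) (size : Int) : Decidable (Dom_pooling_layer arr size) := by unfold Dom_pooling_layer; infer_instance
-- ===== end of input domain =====

-- B computes the pooling in two staged passes — a vertical pass merging each pair of rows
-- into an intermediate row of sorted (hi, lo) pairs via zip, then a horizontal pass combining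
-- adjacent sorted pairs by a closed-form second-order-statistic — instead of A's per-block
-- gather, descending sort and index.

-- ===== PORT A =====
def pooling_layer (arr : List (List Int)) (size : Int) : List (List Int) :=
  let k := PySem.Int.floordiv size 2
  let ans := (PySem.List.pyRange 0 k 1).map (fun _ => List.replicate k.toNat (0 : Int))
  (PySem.List.pyRange 0 k 1).foldl (fun ans i =>
    (PySem.List.pyRange 0 k 1).foldl (fun ans j =>
      let candidates : List Int :=
        [PySem.List.pyGetD (PySem.List.pyGetD arr (2*i) []) (2*j) 0,
         PySem.List.pyGetD (PySem.List.pyGetD arr (2*i+1) []) (2*j) 0,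
         PySem.List.pyGetD (PySem.List.pyGetD arr (2*i) []) (2*j+1) 0,
         PySem.List.pyGetD (PySem.List.pyGetD arr (2*i+1) []) (2*j+1) 0]
      let cs := PySem.List.sorted candidates id true
      PySem.List.pySetD ans i (PySem.List.pySetD (PySem.List.pyGetD ans i []) j (PySem.List.pyGetD cs 1 0)))
      ans)
    ans

-- ===== PORT B =====
def pooling_layer_alt (arr : List (List Int)) (size : Int) : List (List Int) :=
  let half := PySem.Int.floordiv size 2
  if half ≤ 0 then []
  else
    -- pass 1 (vertical): each pair of rows → one row of sorted (hi, lo) pairs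
    let pairs : List (List (Int × Int)) :=
      (PySem.List.pyRange 0 half 1).map (fun i =>
        let r1 := PySem.List.pyGetD arr (2*i) []
        let r2 := PySem.List.pyGetD arr (2*i+1) []
        (r1.zip r2).map (fun xy => if xy.2 ≤ xy.1 then (xy.1, xy.2) else (xy.2, xy.1)))
    -- pass 2 (horizontal): merge adjacent sorted pairs; second-largest in closed form
    pairs.map (fun row =>
      (PySem.List.pyRange 0 half 1).map (fun j =>
        let p := PySem.List.pyGetD row (2*j) ((0 : Int), (0 : Int))
        let q := PySem.List.pyGetD row (2*j+1) ((0 : Int), (0 : Int))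
        max (min p.1 q.1) (if q.1 ≤ p.1 then p.2 else q.2)))

-- ===== PRECONDITION & SPEC =====
-- Pre_ excludes exactly the inputs on which the Python A raises IndexError: when size//2 > 0
-- it accesses rows 0..2*(size//2)-1 and columns 0..2*(size//2)-1 of arr.
def Pre_pooling_layer (arr : List (List Int)) (size : Int) : Prop :=
  0 < PySem.Int.floordiv size 2 →
    (2 * PySem.Int.floordiv size 2 ≤ (arr.length : Int) ∧
     ∀ row ∈ arr.take (2 * PySem.Int.floordiv size 2).toNat,
       2 * PySem.Int.floordiv size 2 ≤ (row.length : Int))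
instance (arr : List (List Int)) (size : Int) : Decidable (Pre_pooling_layer arr size) := by
  unfold Pre_pooling_layer; infer_instance
def pvWitness_pooling_layer : List (List Int) × Int := ([[1, 2], [3, 4]], 2)
def Spec_pooling_layer (arr : List (List Int)) (size : Int) (out : List (List Int)) : Prop :=
  out = pooling_layer_alt arr size
instance (arr : List (List Int)) (size : Int) (out : List (List Int)) : Decidable (Spec_pooling_layer arr size out) := by
  unfold Spec_pooling_layer; infer_instance

-- ===== CLAIM (what is proved, stated in full; the proofs are below) =====
def Claim_equal_pooling_layer : Prop := ∀ (arr : List (List Int)) (size : Int), Dom_pooling_layer arr size → Pre_pooling_layer arr size → Spec_pooling_layer arr size (pooling_layer arr size)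

-- ===== LEMMAS AND PROOFS =====

lemma pv_pg4 (x y z w : Int) : PySem.List.pyGetD [x, y, z, w] 1 0 = y := by
  simp [PySem.List.pyGetD]

-- per-block: B's closed-form merge of the two sorted pairs = second element of A's
-- reverse-sorted 4-list
set_option maxHeartbeats 4000000 in
lemma pv_blk (a b c d : Int) :
    max (min (if b ≤ a then ((a,b) : Int × Int) else (b,a)).1 (if d ≤ c then ((c,d) : Int × Int) else (d,c)).1)
        (if (if d ≤ c then ((c,d) : Int × Int) else (d,c)).1 ≤ (if b ≤ a then ((a,b) : Int × Int) else (b,a)).1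
         then (if b ≤ a then ((a,b) : Int × Int) else (b,a)).2
         else (if d ≤ c then ((c,d) : Int × Int) else (d,c)).2)
    = PySem.List.pyGetD (PySem.List.sorted [a, b, c, d] id true) 1 0 := by
  simp only [PySem.List.sorted, List.foldl, id]
  all_goals try dsimp only
  all_goals try simp only [PySem.List.insertBy, decide_eq_true_eq]
  all_goals try split_ifs
  all_goals try dsimp only
  all_goals try simp only [PySem.List.insertBy, decide_eq_true_eq]
  all_goals try split_ifs
  all_goals try dsimp only
  all_goals try simp only [PySem.List.insertBy, decide_eq_true_eq]
  all_goals try split_ifs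
  all_goals try dsimp only
  all_goals try simp only [PySem.List.insertBy, decide_eq_true_eq]
  all_goals try split_ifs
  all_goals try dsimp only
  all_goals try simp only [PySem.List.insertBy, decide_eq_true_eq]
  all_goals try split_ifs
  all_goals try simp only [pv_pg4]
  all_goals try dsimp only at *
  all_goals try simp only [decide_eq_true_eq] at *
  all_goals omega

lemma pv_fold_set_row (f : Int → Int) :
    ∀ (n : ℕ) (row : List Int), n ≤ row.length →
      (PySem.List.pyRange 0 (n : Int) 1).foldl (fun r j => PySem.List.pySetD r j (f j)) row
        = (PySem.List.pyRange 0 (n : Int) 1).map f ++ row.drop n := by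
  intro n
  induction n with
  | zero => intro row h; simp [PySem.List.pyRange_one_eq_nil]
  | succ n ih =>
      intro row h
      have hcast : ((n + 1 : ℕ) : Int) = (n : Int) + 1 := by push_cast; ring
      rw [hcast, PySem.List.pyRange_one_succ_right (by omega : (0:Int) ≤ (n:Int)),
          List.foldl_append, List.map_append, ih row (by omega)]
      have hlt : n < row.length := by omega
      simp only [List.foldl_cons, List.foldl_nil, List.map_cons, List.map_nil]
      rw [PySem.List.pySetD_natCast]
      have hlen : ((PySem.List.pyRange 0 (n : Int) 1).map f).length = n := by
        simp [PySem.List.length_pyRange_one]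
      rw [List.drop_eq_getElem_cons hlt]
      rw [List.set_append]
      simp [hlen]
      rw [List.drop_eq_getElem_cons hlt]
      rfl

lemma pv_inner_matrix (v : Int → Int) (i : Int) (K : ℕ)
    (m : List (List Int)) (h0 : 0 ≤ i) (hi : i < (m.length : Int)) :
    (PySem.List.pyRange 0 (K : Int) 1).foldl
        (fun ans j => PySem.List.pySetD ans i
          (PySem.List.pySetD (PySem.List.pyGetD ans i []) j (v j))) m
      = PySem.List.pySetD m i
          ((PySem.List.pyRange 0 (K : Int) 1).foldl
            (fun r j => PySem.List.pySetD r j (v j)) (PySem.List.pyGetD m i [])) := by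
  have ht : i.toNat < m.length := by omega
  induction K with
  | zero =>
      simp only [Nat.cast_zero]
      rw [PySem.List.pyRange_one_eq_nil le_rfl]
      simp only [List.foldl_nil]
      rw [PySem.List.pySetD_of_nonneg _ _ h0, PySem.List.pyGetD_eq_getElem _ _ h0 hi]
      exact (List.set_getElem_self ht).symm
  | succ K ih =>
      have hcast : ((K + 1 : ℕ) : Int) = (K : Int) + 1 := by push_cast; ring
      rw [hcast, PySem.List.pyRange_one_succ_right (by omega : (0:Int) ≤ (K:Int)),
          List.foldl_append, List.foldl_append, ih]
      simp only [List.foldl_cons, List.foldl_nil]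
      have e1 : PySem.List.pyGetD (PySem.List.pySetD m i
          ((PySem.List.pyRange 0 (K:Int) 1).foldl
            (fun r j => PySem.List.pySetD r j (v j)) (PySem.List.pyGetD m i []))) i [] =
          (PySem.List.pyRange 0 (K:Int) 1).foldl
            (fun r j => PySem.List.pySetD r j (v j)) (PySem.List.pyGetD m i []) := by
        rw [PySem.List.pySetD_of_nonneg _ _ h0,
            PySem.List.pyGetD_eq_getElem _ _ h0 (by simpa using hi)]
        simp
      rw [e1]
      rw [PySem.List.pySetD_of_nonneg _ _ h0, PySem.List.pySetD_of_nonneg _ _ h0,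
          PySem.List.pySetD_of_nonneg _ _ h0, List.set_set]

-- outer loop of A with its literal matrix-state inner fold: row-by-row replacement
lemma pv_fold_rows (g : Int → Int → Int) (K : ℕ) :
    ∀ (n : ℕ) (m : List (List Int)), n ≤ m.length → (∀ r ∈ m, r.length = K) →
      (PySem.List.pyRange 0 (n : Int) 1).foldl
          (fun ans i => (PySem.List.pyRange 0 (K : Int) 1).foldl
            (fun ans j => PySem.List.pySetD ans i
              (PySem.List.pySetD (PySem.List.pyGetD ans i []) j (g i j))) ans)
          m
        = (PySem.List.pyRange 0 (n : Int) 1).map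
            (fun i => (PySem.List.pyRange 0 (K : Int) 1).map (g i)) ++ m.drop n := by
  intro n
  induction n with
  | zero => intro m h hr; simp [PySem.List.pyRange_one_eq_nil]
  | succ n ih =>
      intro m h hr
      have hcast : ((n + 1 : ℕ) : Int) = (n : Int) + 1 := by push_cast; ring
      rw [hcast, PySem.List.pyRange_one_succ_right (by omega : (0:Int) ≤ (n:Int)),
          List.foldl_append, List.map_append, ih m (by omega) hr]
      have hlt : n < m.length := by omega
      simp only [List.foldl_cons, List.foldl_nil, List.map_cons, List.map_nil]
      have hplen : ((PySem.List.pyRange 0 (n : Int) 1).map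
          (fun i => (PySem.List.pyRange 0 (K : Int) 1).map (g i))).length = n := by
        simp [PySem.List.length_pyRange_one]
      have hmlen : ((PySem.List.pyRange 0 (n : Int) 1).map
          (fun i => (PySem.List.pyRange 0 (K : Int) 1).map (g i)) ++ m.drop n).length = m.length := by
        simp [hplen]; omega
      rw [pv_inner_matrix (fun j => g (n : Int) j) (n : Int) K _ (by omega)
            (by rw [hmlen]; exact_mod_cast hlt)]
      have hget : PySem.List.pyGetD
          ((PySem.List.pyRange 0 (n : Int) 1).map
            (fun i => (PySem.List.pyRange 0 (K : Int) 1).map (g i)) ++ m.drop n) (n : Int) [] = m[n] := by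
        rw [PySem.List.pyGetD_eq_getElem _ _ (by omega) (by rw [hmlen]; exact_mod_cast hlt)]
        rw [List.getElem_append_right (by omega)]
        simp [hplen]
      rw [hget]
      have hrowlen : (K : ℕ) ≤ m[n].length := by
        rw [hr m[n] (List.getElem_mem hlt)]
      rw [pv_fold_set_row (fun j => g (n : Int) j) K m[n] hrowlen]
      have hdropK : (m[n] : List Int).drop K = [] := by
        rw [List.drop_eq_nil_iff]
        rw [hr m[n] (List.getElem_mem hlt)]
      rw [hdropK, List.append_nil]
      rw [PySem.List.pySetD_natCast, List.set_append]
      simp [hplen]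
      rw [List.drop_eq_getElem_cons hlt]
      rfl

-- A as a pure double map over ranges (unconditional)
lemma pvA_map (arr : List (List Int)) (size : Int) :
    pooling_layer arr size
      = (PySem.List.pyRange 0 (PySem.Int.floordiv size 2) 1).map (fun i =>
          (PySem.List.pyRange 0 (PySem.Int.floordiv size 2) 1).map (fun j =>
            PySem.List.pyGetD (PySem.List.sorted
              [PySem.List.pyGetD (PySem.List.pyGetD arr (2*i) []) (2*j) 0,
               PySem.List.pyGetD (PySem.List.pyGetD arr (2*i+1) []) (2*j) 0,
               PySem.List.pyGetD (PySem.List.pyGetD arr (2*i) []) (2*j+1) 0,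
               PySem.List.pyGetD (PySem.List.pyGetD arr (2*i+1) []) (2*j+1) 0] id true) 1 0)) := by
  unfold pooling_layer
  dsimp only
  by_cases hk : PySem.Int.floordiv size 2 ≤ 0
  · rw [PySem.List.pyRange_one_eq_nil hk]
    simp
  · have hk' : 0 ≤ PySem.Int.floordiv size 2 := by omega
    have hKc : ((PySem.Int.floordiv size 2).toNat : Int) = PySem.Int.floordiv size 2 :=
      Int.toNat_of_nonneg hk'
    rw [← hKc]
    simp only [Int.toNat_natCast]
    rw [pv_fold_rows _ (PySem.Int.floordiv size 2).toNat (PySem.Int.floordiv size 2).toNat _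
          (by simp [PySem.List.length_pyRange_one])
          (by intro r hr
              simp only [List.mem_map] at hr
              obtain ⟨x, _, hx⟩ := hr
              rw [← hx]; simp)]
    rw [List.drop_eq_nil_of_le (by simp [PySem.List.length_pyRange_one]), List.append_nil]

lemma pv_ports_eq (arr : List (List Int)) (size : Int)
    (hpre : Pre_pooling_layer arr size) :
    pooling_layer arr size = pooling_layer_alt arr size := by
  rw [pvA_map]
  unfold pooling_layer_alt
  dsimp only
  set H := PySem.Int.floordiv size 2 with hH
  by_cases hk : H ≤ 0
  · rw [if_pos hk, PySem.List.pyRange_one_eq_nil hk, List.map_nil]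
  · rw [if_neg hk]
    have hk0 : 0 < H := by omega
    obtain ⟨hrows, hcols⟩ := hpre hk0
    rw [List.map_map]
    apply List.map_congr_left
    intro i hi
    rw [PySem.List.mem_pyRange_one] at hi
    dsimp only [Function.comp]
    -- row facts
    have h2i : (2*i).toNat < arr.length := by omega
    have h2i1 : (2*i+1).toNat < arr.length := by omega
    have rowlen : ∀ (t : Nat) (h : t < arr.length), t < (2*H).toNat →
        2*H ≤ ((arr[t]'h).length : Int) := by
      intro t h htn
      apply hcols
      rw [List.mem_iff_getElem]
      exact ⟨t, by rw [List.length_take]; omega, by rw [List.getElem_take]⟩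
    have hr1 := rowlen (2*i).toNat h2i (by omega)
    have hr2 := rowlen (2*i+1).toNat h2i1 (by omega)
    have e1 : PySem.List.pyGetD arr (2*i) [] = arr[(2*i).toNat]'h2i :=
      PySem.List.pyGetD_eq_getElem _ _ (by omega) (by omega)
    have e2 : PySem.List.pyGetD arr (2*i+1) [] = arr[(2*i+1).toNat]'h2i1 :=
      PySem.List.pyGetD_eq_getElem _ _ (by omega) (by omega)
    simp only [e1, e2]
    set r1 := arr[(2*i).toNat]'h2i with hr1d
    set r2 := arr[(2*i+1).toNat]'h2i1 with hr2d
    apply List.map_congr_left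
    intro j hj
    rw [PySem.List.mem_pyRange_one] at hj
    dsimp only
    have hziplen : (2*H : Int) ≤ (((r1.zip r2).map
        (fun xy => if xy.2 ≤ xy.1 then (xy.1, xy.2) else (xy.2, xy.1))).length : Int) := by
      rw [List.length_map, List.length_zip]
      push_cast
      omega
    have hget : ∀ t : Int, 0 ≤ t → t < 2*H →
        PySem.List.pyGetD ((r1.zip r2).map
          (fun xy => if xy.2 ≤ xy.1 then (xy.1, xy.2) else (xy.2, xy.1))) t ((0:Int),(0:Int))
        = (if PySem.List.pyGetD r2 t 0 ≤ PySem.List.pyGetD r1 t 0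
           then (PySem.List.pyGetD r1 t 0, PySem.List.pyGetD r2 t 0)
           else (PySem.List.pyGetD r2 t 0, PySem.List.pyGetD r1 t 0)) := by
      intro t ht0 htH
      rw [PySem.List.pyGetD_eq_getElem _ _ ht0 (by omega),
          List.getElem_map, List.getElem_zip,
          PySem.List.pyGetD_eq_getElem r1 _ ht0 (by omega),
          PySem.List.pyGetD_eq_getElem r2 _ ht0 (by omega)]
    rw [hget (2*j) (by omega) (by omega), hget (2*j+1) (by omega) (by omega)]
    exact (pv_blk _ _ _ _).symm

-- ===== VERDICT (by name: the statement is the Claim_ definition above) =====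
theorem pooling_layer_spec : Claim_equal_pooling_layer := by
  intro arr size _ hpre
  unfold Spec_pooling_layer
  exact pv_ports_eq arr size hpre
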